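-- pv_equiv track=rewrite | github.com/SungMinWoo/Algorithm | 2021kakao_bllnd_menu_renewal.py | solution
-- ===== SOURCE A (Python) =====
-- from itertools import combinations
--
-- def solution(orders, course):
--     new_list = []
--     combi = []
--     result = []
--     course_list = []
--     answer = []
--     if len(set(orders)) == 1:
--         answer = []
--         new_lists = []
--         for a in course:
--             new_lists.append(combinations(orders[0],a))
--
--         for a in new_lists:
--             for b in a:
--                 answer.append(''.join(b))
--         return sorted(set(answer))
--     else:
--         for a in range(len(orders)):
--             new_list.append([]) # orders의 길이 만큼 빈 list 생성
--             combi.append(a) # orders의 반복만큼 정수 list 생성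
--             for i in orders[a]:
--                 new_list[a].append(i) # order의 문자열을 2차원 리스트로 변환
--
--         for i in list(combinations(combi, 2)): # orders의 모든 조합 생성
--             a = ''.join(sorted(set(new_list[i[0]]) & set(new_list[i[1]]))) # 조합마다 모든 리스트 비교 및 정렬 후 문자열로 전환
--             if len(a) in course:
--                 result.append([a, i[0]])
--                 course_list.append(i[0])
--
--         for a in set(course_list): # course_list 중복값 제거
--             result_len_list = []
--             for b in result:
--                 if b[1] == a: # result 2차원 리스트의 1번째 값이 같은 번호로 주문한 사람이라면
--                     result_len_list.append(len(b[0])) # 같은 번호의 문자열 리스트를 담음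
--             max_result_len = max(result_len_list) # 문자열 중 가장 빈도수가 많은 값
--             for d in result:
--                 if len(d[0]) == max_result_len and d[1] == a: # 길이가 가장 길고 같은 번호로 주문한 사람이면
--                     answer.append(d[0])
--
--         return sorted(set(answer))
-- ===== SOURCE B (Python) =====
-- from itertools import combinations
--
-- def solution(orders, course):
--     if len(set(orders)) == 1:
--         answer = []
--         new_lists = []
--         for a in course:
--             new_lists.append(combinations(orders[0], a))
--         for a in new_lists:
--             for b in a:
--                 answer.append(''.join(b))
--         return sorted(set(answer))
--     best = {}
--     for i, j in combinations(range(len(orders)), 2):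
--         s = ''.join(sorted(set(orders[i]) & set(orders[j])))
--         if len(s) in course:
--             m, strs = best.get(i, (-1, []))
--             if len(s) > m:
--                 best[i] = (len(s), [s])
--             elif len(s) == m:
--                 best[i] = (m, strs + [s])
--     answer = set()
--     for m, strs in best.values():
--         answer.update(strs)
--     return sorted(answer)
-- ===== Notes on version B (the rewrite author's own statement) =====
-- stated objective: alternative
-- what changed: A stages the work: it materialises a char-matrix, a global result list of all qualifying pair-strings plus a parallel tag list, and then for each distinct first index rescans that whole result list twice (collect lengths, take max, rescan to select); B makes one flat pass over the index pairs, maintaining a dict first-index -> (running max length, current winners) updated online, so no global pair list, no tag list, no max/rescan passes exist.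
-- outside the precondition, e.g. on solution(['ab', 'ab'], [-1]): A raises ValueError, B raises ValueError
import Mathlib
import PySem

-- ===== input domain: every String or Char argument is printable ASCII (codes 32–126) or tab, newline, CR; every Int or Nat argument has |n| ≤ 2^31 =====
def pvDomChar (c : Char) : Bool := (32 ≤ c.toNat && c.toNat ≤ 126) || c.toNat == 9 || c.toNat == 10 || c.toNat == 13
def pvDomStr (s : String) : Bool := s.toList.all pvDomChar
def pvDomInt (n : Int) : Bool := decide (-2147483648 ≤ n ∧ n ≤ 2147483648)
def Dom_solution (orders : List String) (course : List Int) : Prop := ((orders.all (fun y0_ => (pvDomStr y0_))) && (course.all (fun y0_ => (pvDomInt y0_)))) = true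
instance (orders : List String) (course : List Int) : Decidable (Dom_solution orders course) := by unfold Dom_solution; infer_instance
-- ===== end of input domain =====

-- B replaces A's staged passes (global pair list, parallel tag list, per-index rescans with max)
-- by ONE flat pass over the index pairs maintaining a dict first-index -> (running max, winners)
-- updated online (objective: alternative).

-- ===== PORT A =====
-- shared by both ports: the all-identical-orders branch, which B keeps verbatim
def singleBranch (orders : List String) (course : List Int) : List String :=
  let chars0 := ((PySem.List.pyGet? orders 0).getD "").toList
  let newLists := course.foldl (fun nl a => nl ++ [PySem.List.combinations chars0 a.toNat]) []
  let answer := newLists.foldl (fun ans l => l.foldl (fun ans b => ans ++ [String.ofList b]) ans) []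
  PySem.List.sorted (PySem.Set.ofList answer) (fun x => x) false

def solution (orders : List String) (course : List Int) : List String :=
  if PySem.Set.len (PySem.Set.ofList orders) == 1 then
    singleBranch orders course
  else
    -- first loop: build new_list (orders as char lists) and combi (the index list)
    let st0 := (PySem.List.pyRange 0 (orders.length : Int) 1).foldl
      (fun (st : List (List Char) × List Int) a =>
        (st.1 ++ [(((PySem.List.pyGet? orders a).getD "").toList.foldl (fun l i => l ++ [i]) [])],
         st.2 ++ [a])) ([], [])
    let new_list := st0.1
    let combi := st0.2
    -- second loop: over all 2-combinations of combi
    let st1 := (PySem.List.combinations combi 2).foldl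
      (fun (st : List (String × Int) × List Int) i =>
        let i0 := PySem.List.pyGetD i 0 0
        let i1 := PySem.List.pyGetD i 1 0
        let a := String.ofList (PySem.List.sorted
          (PySem.Set.inter (PySem.Set.ofList (PySem.List.pyGetD new_list i0 []))
                           (PySem.List.pyGetD new_list i1 [])) (fun x => x) false)
        if course.contains ((PySem.Str.len a : Int)) then
          (st.1 ++ [(a, i0)], st.2 ++ [i0])
        else st) ([], [])
    let result := st1.1
    let course_list := st1.2
    -- third loop: over set(course_list), rescanning result twice per index
    let answer := (PySem.Set.ofList course_list).foldl (fun ans a =>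
      let result_len_list := result.foldl
        (fun l b => if b.2 == a then l ++ [((PySem.Str.len b.1 : Int))] else l) []
      -- Python's max over a list that is never empty when this line runs
      let max_result_len := (PySem.List.max? result_len_list (fun x => x)).getD 0
      result.foldl (fun ans d =>
        if (PySem.Str.len d.1 : Int) == max_result_len && d.2 == a then ans ++ [d.1] else ans) ans) []
    PySem.List.sorted (PySem.Set.ofList answer) (fun x => x) false

-- ===== PORT B =====
def solution_alt (orders : List String) (course : List Int) : List String :=
  if PySem.Set.len (PySem.Set.ofList orders) == 1 then
    singleBranch orders course
  else
    -- one flat pass over combinations(range(len(orders)), 2),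
    -- best : dict first-index -> (running max length, winners so far), updated online
    let best := (PySem.List.combinations (PySem.List.pyRange 0 (orders.length : Int) 1) 2).foldl
      (fun (d : PySem.Dict Int (Int × List String)) p =>
        let i := PySem.List.pyGetD p 0 0
        let j := PySem.List.pyGetD p 1 0
        let s := String.ofList (PySem.List.sorted
          (PySem.Set.inter (PySem.Set.ofList ((PySem.List.pyGet? orders i).getD "").toList)
                           (((PySem.List.pyGet? orders j).getD "").toList)) (fun x => x) false)
        if course.contains (PySem.Str.len s) then
          let ms := d.getD i (-1, [])
          if PySem.Str.len s > ms.1 then d.insert i (PySem.Str.len s, [s])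
          else if PySem.Str.len s == ms.1 then d.insert i (ms.1, ms.2 ++ [s])
          else d
        else d) PySem.Dict.empty
    let answer := best.values.foldl (fun ans ms => ms.2.foldl PySem.Set.add ans) []
    PySem.List.sorted answer (fun x => x) false

-- ===== PRECONDITION & SPEC =====
-- Pre_ excludes only inputs where Python A raises: when all orders are one identical string,
-- a negative course entry makes combinations(orders[0], a) raise ValueError.
def Pre_solution (orders : List String) (course : List Int) : Prop :=
  PySem.Set.len (PySem.Set.ofList orders) = 1 → ∀ c ∈ course, 0 ≤ c
instance (orders : List String) (course : List Int) : Decidable (Pre_solution orders course) := by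
  unfold Pre_solution; infer_instance
def pvWitness_solution : List String × List Int := (["ab", "ac"], [2])

def Spec_solution (orders : List String) (course : List Int) (out : List String) : Prop := out = solution_alt orders course
instance (orders : List String) (course : List Int) (out : List String) : Decidable (Spec_solution orders course out) := by unfold Spec_solution; infer_instance

-- ===== CLAIM (what is proved, stated in full; the proofs are below) =====
def Claim_equal_solution : Prop := ∀ (orders : List String) (course : List Int), Dom_solution orders course → Pre_solution orders course → Spec_solution orders course (solution orders course)

-- ===== LEMMAS AND PROOFS =====
-- Proof-only abbreviations for the shared intersection string, qualifying-j list, group, and maxima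
def pvChs (orders : List String) (i : Int) : List Char :=
  ((PySem.List.pyGet? orders i).getD "").toList

def pvS (orders : List String) (i j : Int) : String :=
  String.ofList (PySem.List.sorted
    (PySem.Set.inter (PySem.Set.ofList (pvChs orders i)) (pvChs orders j)) (fun x => x) false)

def pvOk (orders : List String) (course : List Int) (i j : Int) : Bool :=
  course.contains (PySem.Str.len (pvS orders i j))

def pvJs (orders : List String) (course : List Int) (n i : Int) : List Int :=
  (PySem.List.pyRange (i + 1) n 1).filter (pvOk orders course i)

def pvGrp (orders : List String) (course : List Int) (n i : Int) : List String :=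
  (pvJs orders course n i).map (pvS orders i)

def pvMax (g : List String) : Int :=
  (PySem.List.max? (g.map (fun s => PySem.Str.len s)) (fun x => x)).getD 0

def pvSel (g : List String) : List String :=
  g.filter (fun s => (PySem.Str.len s == pvMax g))

-- B-side proof machinery: the online (running max, winners) state machine
def pvStep (ms : Int × List String) (s : String) : Int × List String :=
  if PySem.Str.len s > ms.1 then (PySem.Str.len s, [s])
  else if PySem.Str.len s == ms.1 then (ms.1, ms.2 ++ [s])
  else ms

def pvF (g : List String) : Int × List String := g.foldl pvStep (-1, [])

def pvEnt (orders : List String) (course : List Int) (n i : Int) : List (Int × (Int × List String)) :=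
  if (pvGrp orders course n i).isEmpty then [] else [(i, pvF (pvGrp orders course n i))]

def pvOptEnt (i : Int) (st : Option (Int × List String)) : List (Int × (Int × List String)) :=
  match st with
  | none => []
  | some v => [(i, v)]

-- the B loop body, with the pair already destructured
def pvDStep (orders : List String) (course : List Int) (i : Int)
    (d : PySem.Dict Int (Int × List String)) (j : Int) : PySem.Dict Int (Int × List String) :=
  if pvOk orders course i j then
    let ms := d.getD i (-1, [])
    if PySem.Str.len (pvS orders i j) > ms.1 then d.insert i (PySem.Str.len (pvS orders i j), [pvS orders i j])
    else if PySem.Str.len (pvS orders i j) == ms.1 then d.insert i (ms.1, ms.2 ++ [pvS orders i j])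
    else d
  else d

-- the same body acting on the abstract Option state
def pvStep1 (orders : List String) (course : List Int) (i : Int)
    (st : Option (Int × List String)) (j : Int) : Option (Int × List String) :=
  if pvOk orders course i j then some (pvStep (st.getD (-1, [])) (pvS orders i j)) else st

-- combinations(range(a,b), 2) as a flatMap of tail ranges
theorem combos2_pyRange (a b : Int) :
    PySem.List.combinations (PySem.List.pyRange a b 1) 2 =
      (PySem.List.pyRange a b 1).flatMap
        (fun i => (PySem.List.pyRange (i + 1) b 1).map (fun j => [i, j])) := by
  by_cases hab : b ≤ a
  · rw [PySem.List.pyRange_one_eq_nil hab]; rfl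
  · rw [PySem.List.pyRange_one_cons (by omega), PySem.List.combinations_cons_succ,
        PySem.List.combinations_one, combos2_pyRange (a+1) b, List.flatMap_cons,
        List.map_map]
    rfl
termination_by (b - a).toNat
decreasing_by omega

-- Set.add over elements already present is the identity
theorem foldl_add_mem (s : List Int) (xs : List Int) (h : ∀ x ∈ xs, x ∈ s) :
    xs.foldl PySem.Set.add s = s := by
  induction xs with
  | nil => rfl
  | cons x t ih =>
    have hx : PySem.Set.add s x = s := by
      simp only [PySem.Set.add]
      rw [if_pos ((PySem.Set.contains_iff s x).2 (h x (List.mem_cons_self)))]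
    simp only [List.foldl_cons, hx]
    exact ih (fun y hy => h y (by simp [hy]))

-- one identical-valued block feeds Set.add once
theorem foldl_add_const (xs : List Int) (a : Int) (s : List Int)
    (h : ∀ x ∈ xs, x = a) (ha : a ∉ s) :
    xs.foldl PySem.Set.add s = if xs.isEmpty then s else s ++ [a] := by
  cases xs with
  | nil => rfl
  | cons x t =>
    have hx : x = a := h x (by simp)
    subst hx
    have hadd : PySem.Set.add s x = s ++ [x] := by
      simp only [PySem.Set.add]
      rw [if_neg (fun hc => ha ((PySem.Set.contains_iff s x).1 hc))]
    simp only [List.foldl_cons, hadd, List.isEmpty_cons, Bool.false_eq_true, if_false]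
    exact foldl_add_mem _ _ (fun y hy => by rw [h y (List.mem_cons_of_mem x hy)]; simp)

theorem foldl_add_flatMap_const (l : List Int) (g : Int → List Int) (s : List Int)
    (hn : l.Nodup) (hg : ∀ i ∈ l, ∀ x ∈ g i, x = i) (hs : ∀ i ∈ l, i ∉ s) :
    (l.flatMap g).foldl PySem.Set.add s = s ++ l.filter (fun i => !(g i).isEmpty) := by
  induction l generalizing s with
  | nil => simp
  | cons a t ih =>
    rw [List.flatMap_cons, List.foldl_append,
        foldl_add_const (g a) a s (hg a (by simp)) (hs a (by simp))]
    rcases List.nodup_cons.1 hn with ⟨hat, hnt⟩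
    by_cases he : (g a).isEmpty
    · rw [if_pos he, ih s hnt (fun i hi x hx => hg i (List.mem_cons_of_mem a hi) x hx)
            (fun i hi => hs i (List.mem_cons_of_mem a hi))]
      simp [he]
    · rw [if_neg he, ih (s ++ [a]) hnt (fun i hi x hx => hg i (List.mem_cons_of_mem a hi) x hx)
            (fun i hi => by
              simp only [List.mem_append, List.mem_singleton]
              rintro (h1 | h2)
              · exact hs i (List.mem_cons_of_mem a hi) h1
              · exact hat (h2 ▸ hi))]
      simp [he]

-- a nodup index list: only the a-block of a flatMap survives when all other blocks are empty
theorem flatMap_pick {β : Type} (l : List Int) (hn : l.Nodup) {a : Int} (ha : a ∈ l)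
    (k : Int → List β) (h : ∀ i ∈ l, i ≠ a → k i = []) : l.flatMap k = k a := by
  induction l with
  | nil => simp at ha
  | cons x t ih =>
    rcases List.nodup_cons.1 hn with ⟨hxt, hnt⟩
    rcases List.mem_cons.1 ha with rfl | hat
    · rw [List.flatMap_cons]
      have : t.flatMap k = [] := by
        apply List.flatMap_eq_nil_iff.2
        intro i hi
        exact h i (by simp [hi]) (fun hia => hxt (hia ▸ hi))
      simp [this]
    · rw [List.flatMap_cons, h x (by simp) (fun hxa => hxt (hxa ▸ hat)),
          ih hnt hat (fun i hi => h i (by simp [hi]))]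
      simp

-- Python list indexing on a two-element pair list
theorem pyGetD_pair0 (i j : Int) : PySem.List.pyGetD [i, j] 0 0 = i := rfl
theorem pyGetD_pair1 (i j : Int) : PySem.List.pyGetD [i, j] 1 0 = j := rfl

-- string lengths are nonnegative
theorem pvLen_nonneg (s : String) : 0 ≤ PySem.Str.len s := by
  rw [PySem.Str.len_eq]; positivity

-- every element of a group is at most its pvMax
theorem pvLe (g : List String) (x : String) (hx : x ∈ g) : PySem.Str.len x ≤ pvMax g := by
  cases g with
  | nil => simp at hx
  | cons a t =>
    have hm : PySem.List.max? (PySem.Str.len a :: t.map (fun s => PySem.Str.len s)) (fun y => y) =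
        some (List.foldl max (PySem.Str.len a) (t.map (fun s => PySem.Str.len s))) :=
      PySem.List.max?_id_cons _ _
    have hmem : PySem.Str.len x ∈ PySem.Str.len a :: t.map (fun s => PySem.Str.len s) := by
      have h1 := List.mem_map_of_mem (f := fun s => PySem.Str.len s) hx
      rw [List.map_cons] at h1
      exact h1
    have h := PySem.List.max?_isMax hm (PySem.Str.len x) hmem
    rw [pvMax, List.map_cons, hm, Option.getD_some]
    exact h

theorem pvMax_append (g : List String) (s : String) (hg : g ≠ []) :
    pvMax (g ++ [s]) = max (pvMax g) (PySem.Str.len s) := by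
  cases g with
  | nil => cases hg rfl
  | cons x t =>
    rw [pvMax, pvMax, List.cons_append, List.map_cons, List.map_cons,
        PySem.List.max?_id_cons, PySem.List.max?_id_cons, Option.getD_some, Option.getD_some,
        List.map_append, List.map_cons, List.map_nil, List.foldl_append, List.foldl_cons,
        List.foldl_nil]

-- the online state machine computes (pvMax, pvSel)
theorem pvF_eq (g : List String) :
    pvF g = if g.isEmpty then (-1, []) else (pvMax g, pvSel g) := by
  induction g using List.reverseRecOn with
  | nil => rfl
  | append_singleton g s ih =>
    have hstep : pvF (g ++ [s]) = pvStep (pvF g) s := by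
      simp [pvF, List.foldl_append]
    rw [hstep, ih]
    by_cases hg : g.isEmpty
    · have hgl : g = [] := by simpa using hg
      subst hgl
      have hpos : PySem.Str.len s > (-1 : Int) := lt_of_lt_of_le (by norm_num) (pvLen_nonneg s)
      have hm1 : pvMax [s] = PySem.Str.len s := by
        rw [pvMax, List.map_cons, List.map_nil, PySem.List.max?_id_cons, Option.getD_some,
          List.foldl_nil]
      rw [if_pos (by rfl : ([] : List String).isEmpty = true), if_neg (by simp),
        List.nil_append]
      simp only [pvStep]
      rw [if_pos hpos, pvSel, hm1]
      simp
    · have hne : g ≠ [] := by simpa using hg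
      have hmax := pvMax_append g s hne
      rw [if_neg (by simpa using hg), if_neg (by simp)]
      simp only [pvStep]
      rcases lt_trichotomy (pvMax g) (PySem.Str.len s) with hlt | heq | hgt
      · -- a new strict maximum: previous winners are all shorter
        have hm2 : pvMax (g ++ [s]) = PySem.Str.len s := by
          rw [hmax, max_eq_right hlt.le]
        have hfil : g.filter (fun x => (PySem.Str.len x == PySem.Str.len s)) = [] := by
          apply List.filter_eq_nil_iff.2
          intro x hx
          have hle := pvLe g x hx
          simp only [beq_iff_eq]
          omega
        rw [if_pos hlt, pvSel, hm2, List.filter_append, hfil, List.nil_append]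
        simp
      · -- same length: append to the winners
        have hm2 : pvMax (g ++ [s]) = pvMax g := by
          rw [hmax, ← heq, max_self]
        have hngt : ¬ PySem.Str.len s > pvMax g := by omega
        have hbeq : (PySem.Str.len s == pvMax g) = true := by
          rw [beq_iff_eq]; omega
        rw [if_neg hngt, if_pos (by rw [hbeq] : (PySem.Str.len s == pvMax g) = true), pvSel,
          pvSel, hm2, List.filter_append]
        simp only [List.filter_cons, List.filter_nil]
        rw [if_pos hbeq]
      · -- shorter: state unchanged
        have hm2 : pvMax (g ++ [s]) = pvMax g := by
          rw [hmax, max_eq_left hgt.le]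
        have hngt : ¬ PySem.Str.len s > pvMax g := by omega
        have hbeq : (PySem.Str.len s == pvMax g) = false := by
          rw [beq_eq_false_iff_ne]; omega
        rw [if_neg hngt, if_neg (by rw [hbeq]; exact Bool.false_ne_true), pvSel, pvSel, hm2,
          List.filter_append]
        simp only [List.filter_cons, List.filter_nil]
        rw [if_neg (by rw [hbeq]; exact Bool.false_ne_true), List.append_nil]

-- dict micro-facts for a dict whose tail slot (if any) is key i, all other keys ≠ i
theorem dGetD_tail {ν : Type} (i : Int) (items0 : List (Int × ν)) (tail : Option ν) (dflt : ν)
    (h0 : ∀ p ∈ items0, (p.1 == i) = false) :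
    (PySem.Dict.mk (items0 ++ (match tail with | none => [] | some v => [(i, v)])) : PySem.Dict Int ν).getD i dflt =
      tail.getD dflt := by
  have hfind : items0.find? (fun p => p.1 == i) = none :=
    List.find?_eq_none.2 (fun p hp => by simp [h0 p hp])
  cases tail with
  | none => simp [PySem.Dict.getD, PySem.Dict.get?, hfind]
  | some v => simp [PySem.Dict.getD, PySem.Dict.get?, hfind]

theorem dIns_none {ν : Type} (i : Int) (items0 : List (Int × ν)) (v : ν)
    (h0 : ∀ p ∈ items0, (p.1 == i) = false) :
    (PySem.Dict.mk items0 : PySem.Dict Int ν).insert i v = PySem.Dict.mk (items0 ++ [(i, v)]) := by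
  have hc : (PySem.Dict.mk items0 : PySem.Dict Int ν).contains i = false := by
    simp only [PySem.Dict.contains]
    exact List.any_eq_false.2 (fun p hp => by simp [h0 p hp])
  simp [PySem.Dict.insert, hc]

theorem dIns_some {ν : Type} (i : Int) (items0 : List (Int × ν)) (v w : ν)
    (h0 : ∀ p ∈ items0, (p.1 == i) = false) :
    (PySem.Dict.mk (items0 ++ [(i, v)]) : PySem.Dict Int ν).insert i w =
      PySem.Dict.mk (items0 ++ [(i, w)]) := by
  have hc : (PySem.Dict.mk (items0 ++ [(i, v)]) : PySem.Dict Int ν).contains i = true := by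
    simp [PySem.Dict.contains]
  have hmap : items0.map (fun p => if p.1 = i then (i, w) else p) = items0 := by
    rw [List.map_congr_left (fun p hp => if_neg (beq_eq_false_iff_ne.1 (h0 p hp)))]
    exact List.map_id' items0
  simp [PySem.Dict.insert, hc, List.map_append, hmap]

-- one step of the B loop on the abstracted dict shape
theorem dStep_shape (orders : List String) (course : List Int) (i j : Int)
    (items0 : List (Int × (Int × List String))) (st : Option (Int × List String))
    (h0 : ∀ p ∈ items0, (p.1 == i) = false) :
    pvDStep orders course i (PySem.Dict.mk (items0 ++ pvOptEnt i st)) j =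
      PySem.Dict.mk (items0 ++ pvOptEnt i (pvStep1 orders course i st j)) := by
  by_cases hok : pvOk orders course i j = true
  · cases st with
    | none =>
      have hget0 : (PySem.Dict.mk items0 : PySem.Dict Int (Int × List String)).getD i (-1, []) =
          (-1, []) := by
        have h := dGetD_tail i items0 none (-1, []) h0
        simpa [pvOptEnt] using h
      have hpos : PySem.Str.len (pvS orders i j) > (-1 : Int) :=
        lt_of_lt_of_le (by norm_num) (pvLen_nonneg _)
      simp only [pvOptEnt, List.append_nil, pvDStep, pvStep1, if_pos hok, hget0,
        Option.getD_none, pvStep]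
      rw [if_pos hpos, if_pos hpos, dIns_none i items0 _ h0]
    | some v =>
      have hget0 : (PySem.Dict.mk (items0 ++ [(i, v)]) : PySem.Dict Int (Int × List String)).getD
          i (-1, []) = v := by
        have h := dGetD_tail i items0 (some v) (-1, []) h0
        simpa [pvOptEnt] using h
      simp only [pvOptEnt, pvDStep, pvStep1, if_pos hok, hget0, Option.getD_some, pvStep]
      by_cases h1 : PySem.Str.len (pvS orders i j) > v.1
      · rw [if_pos h1, if_pos h1, dIns_some i items0 v _ h0]
      · rw [if_neg h1, if_neg h1]
        by_cases h2 : (PySem.Str.len (pvS orders i j) == v.1) = true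
        · rw [if_pos h2, if_pos h2, dIns_some i items0 v _ h0]
        · rw [if_neg h2, if_neg h2]
  · simp only [pvDStep, pvStep1, if_neg hok]

-- the whole inner block on the abstracted shape
theorem inner_fold (orders : List String) (course : List Int) (i : Int) (js : List Int)
    (items0 : List (Int × (Int × List String))) (st : Option (Int × List String))
    (h0 : ∀ p ∈ items0, (p.1 == i) = false) :
    js.foldl (pvDStep orders course i) (PySem.Dict.mk (items0 ++ pvOptEnt i st)) =
      PySem.Dict.mk (items0 ++ pvOptEnt i (js.foldl (pvStep1 orders course i) st)) := by
  induction js generalizing st with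
  | nil => rfl
  | cons j t ih =>
    rw [List.foldl_cons, List.foldl_cons, dStep_shape orders course i j items0 st h0, ih]

-- a some-state stays some and accumulates with pvStep
theorem foldl_opt_some (h : List String) (v : Int × List String) :
    h.foldl (fun st s => some (pvStep (st.getD (-1, [])) s)) (some v) = some (h.foldl pvStep v) := by
  induction h generalizing v with
  | nil => rfl
  | cons s t ih => simp [List.foldl_cons, ih]

theorem foldl_opt (h : List String) :
    h.foldl (fun st s => some (pvStep (st.getD (-1, [])) s)) none =
      if h.isEmpty then none else some (pvF h) := by
  cases h with
  | nil => rfl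
  | cons s t =>
    simp only [List.foldl_cons, Option.getD_none, List.isEmpty_cons, Bool.false_eq_true, if_false,
      foldl_opt_some, pvF]

-- the abstract state over the j-range computes the group's online result
theorem step1_fold (orders : List String) (course : List Int) (n i : Int) :
    (PySem.List.pyRange (i + 1) n 1).foldl (pvStep1 orders course i) none =
      if (pvGrp orders course n i).isEmpty then none else some (pvF (pvGrp orders course n i)) := by
  have h1 : (PySem.List.pyRange (i + 1) n 1).foldl (pvStep1 orders course i) none =
      (pvGrp orders course n i).foldl (fun st s => some (pvStep (st.getD (-1, [])) s)) none := by
    rw [pvGrp, pvJs, List.foldl_map, List.foldl_filter]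
    rfl
  rw [h1, foldl_opt]

-- one whole block on a dict carrying no i-keyed entry
theorem block_fold (orders : List String) (course : List Int) (n i : Int)
    (items0 : List (Int × (Int × List String)))
    (h0 : ∀ p ∈ items0, (p.1 == i) = false) :
    (PySem.List.pyRange (i + 1) n 1).foldl (pvDStep orders course i) (PySem.Dict.mk items0) =
      PySem.Dict.mk (items0 ++ pvEnt orders course n i) := by
  have h := inner_fold orders course i (PySem.List.pyRange (i + 1) n 1) items0 none h0
  rw [show (items0 ++ pvOptEnt i none) = items0 from List.append_nil _] at h
  rw [h, step1_fold]
  by_cases he : (pvGrp orders course n i).isEmpty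
  · simp [pvEnt, he, pvOptEnt]
  · simp [pvEnt, he, pvOptEnt]

-- the outer loop over the first indices
theorem outer_fold (orders : List String) (course : List Int) (n : Int) (l : List Int)
    (items0 : List (Int × (Int × List String)))
    (hn : l.Nodup) (hdisj : ∀ p ∈ items0, p.1 ∉ l) :
    l.foldl (fun d i => (PySem.List.pyRange (i + 1) n 1).foldl (pvDStep orders course i) d)
        (PySem.Dict.mk items0) =
      PySem.Dict.mk (items0 ++ l.flatMap (fun i => pvEnt orders course n i)) := by
  induction l generalizing items0 with
  | nil => simp
  | cons a t ih =>
    rcases List.nodup_cons.1 hn with ⟨hat, hnt⟩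
    rw [List.foldl_cons,
        block_fold orders course n a items0
          (fun p hp => beq_eq_false_iff_ne.2 (fun h => hdisj p hp (h ▸ List.mem_cons_self))),
        ih (items0 ++ pvEnt orders course n a) hnt ?_]
    · rw [List.flatMap_cons, List.append_assoc]
    · intro p hp
      rcases List.mem_append.1 hp with hp0 | hpe
      · exact fun hm => hdisj p hp0 (List.mem_cons_of_mem a hm)
      · have hpa : p.1 = a := by
          simp only [pvEnt] at hpe
          split at hpe
          · simp at hpe
          · simp only [List.mem_singleton] at hpe
            rw [hpe]
        rw [hpa]
        exact hat

-- the else-branch of B in closed form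
theorem alt_else (orders : List String) (course : List Int)
    (h : ¬ (PySem.Set.len (PySem.Set.ofList orders) == 1) = true) :
    solution_alt orders course =
      PySem.List.sorted (PySem.Set.ofList
        ((PySem.List.pyRange 0 (orders.length : Int) 1).flatMap
          (fun i => pvSel (pvGrp orders course (orders.length : Int) i))))
        (fun x => x) false := by
  simp only [solution_alt, if_neg h]
  rw [combos2_pyRange 0 (orders.length : Int), List.foldl_flatMap]
  have hfun : (fun (d : PySem.Dict Int (Int × List String)) i =>
      List.foldl (fun (d : PySem.Dict Int (Int × List String)) p =>
        let i := PySem.List.pyGetD p 0 0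
        let j := PySem.List.pyGetD p 1 0
        let s := String.ofList (PySem.List.sorted
          (PySem.Set.inter (PySem.Set.ofList ((PySem.List.pyGet? orders i).getD "").toList)
                           (((PySem.List.pyGet? orders j).getD "").toList)) (fun x => x) false)
        if course.contains (PySem.Str.len s) then
          let ms := d.getD i (-1, [])
          if PySem.Str.len s > ms.1 then d.insert i (PySem.Str.len s, [s])
          else if PySem.Str.len s == ms.1 then d.insert i (ms.1, ms.2 ++ [s])
          else d
        else d) d ((PySem.List.pyRange (i + 1) (orders.length : Int) 1).map (fun j => [i, j]))) =
      (fun (d : PySem.Dict Int (Int × List String)) i =>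
        (PySem.List.pyRange (i + 1) (orders.length : Int) 1).foldl (pvDStep orders course i) d) := by
    funext d i
    rw [List.foldl_map]
    rfl
  rw [hfun,
      show (PySem.Dict.empty : PySem.Dict Int (Int × List String)) = PySem.Dict.mk [] from rfl,
      outer_fold orders course (orders.length : Int) _ [] (PySem.List.nodup_pyRange_one 0 _)
        (fun p hp => by simp at hp)]
  have hvals : (PySem.Dict.mk
      (([] : List (Int × (Int × List String))) ++
        (PySem.List.pyRange 0 (orders.length : Int) 1).flatMap
          (fun i => pvEnt orders course (orders.length : Int) i))).values =
      ((PySem.List.pyRange 0 (orders.length : Int) 1).flatMap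
        (fun i => pvEnt orders course (orders.length : Int) i)).map (fun p => p.2) := by
    rfl
  rw [hvals]
  have hflat : (((PySem.List.pyRange 0 (orders.length : Int) 1).flatMap
        (fun i => pvEnt orders course (orders.length : Int) i)).map
          (fun (p : Int × (Int × List String)) => p.2)).flatMap
        (fun (ms : Int × List String) => ms.2) =
      (PySem.List.pyRange 0 (orders.length : Int) 1).flatMap
        (fun i => pvSel (pvGrp orders course (orders.length : Int) i)) := by
    rw [List.flatMap_map, List.flatMap_assoc]
    apply List.flatMap_congr
    intro i _
    by_cases he : (pvGrp orders course (orders.length : Int) i).isEmpty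
    · have hnil : pvGrp orders course (orders.length : Int) i = [] := by simpa using he
      simp [pvEnt, hnil, pvSel]
    · have hne : pvGrp orders course (orders.length : Int) i ≠ [] := by simpa using he
      simp [pvEnt, he, pvF_eq, pvSel]
  have hans : (((PySem.List.pyRange 0 (orders.length : Int) 1).flatMap
        (fun i => pvEnt orders course (orders.length : Int) i)).map
          (fun (p : Int × (Int × List String)) => p.2)).foldl
        (fun ans (ms : Int × List String) => ms.2.foldl PySem.Set.add ans) [] =
      PySem.Set.ofList ((PySem.List.pyRange 0 (orders.length : Int) 1).flatMap
        (fun i => pvSel (pvGrp orders course (orders.length : Int) i))) := by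
    rw [← List.foldl_flatMap, ← hflat, PySem.Set.ofList_eq_foldl]
  rw [hans]

-- the else-branch of A in the same closed form
theorem a_else (orders : List String) (course : List Int)
    (h : ¬ (PySem.Set.len (PySem.Set.ofList orders) == 1) = true) :
    solution orders course =
      PySem.List.sorted (PySem.Set.ofList
        ((PySem.List.pyRange 0 (orders.length : Int) 1).foldl (fun ans i =>
          if (pvGrp orders course (orders.length : Int) i).isEmpty then ans
          else ans ++ pvSel (pvGrp orders course (orders.length : Int) i)) []))
        (fun x => x) false := by
  have hst0 : (PySem.List.pyRange 0 (orders.length : Int) 1).foldl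
      (fun (st : List (List Char) × List Int) a =>
        (st.1 ++ [(((PySem.List.pyGet? orders a).getD "").toList.foldl (fun l i => l ++ [i]) [])],
         st.2 ++ [a])) ([], []) =
      ((PySem.List.pyRange 0 (orders.length : Int) 1).map (pvChs orders),
       PySem.List.pyRange 0 (orders.length : Int) 1) := by
    rw [PySem.List.foldl_prod_mk
          (fun s1 a => s1 ++ [List.foldl (fun l i => l ++ [i]) [] ((PySem.List.pyGet? orders a).getD "").toList])
          (fun s2 a => s2 ++ [a])]
    simp only [PySem.List.foldl_append_singleton, List.nil_append, Prod.mk.injEq]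
    refine ⟨?_, trivial⟩
    rw [PySem.List.foldl_append_singleton_eq_map]
    simp [pvChs]
  have hpairs :
      (List.flatMap (fun i => List.map (fun j => [i, j]) (PySem.List.pyRange (i + 1) (orders.length : Int) 1))
        (PySem.List.pyRange 0 (orders.length : Int) 1)).foldl
      (fun (st : List (String × Int) × List Int) i =>
        if course.contains ((PySem.Str.len (String.ofList (PySem.List.sorted
              ((PySem.Set.ofList (PySem.List.pyGetD (List.map (pvChs orders) (PySem.List.pyRange 0 (orders.length : Int) 1)) (PySem.List.pyGetD i 0 0) [])).inter
                (PySem.List.pyGetD (List.map (pvChs orders) (PySem.List.pyRange 0 (orders.length : Int) 1)) (PySem.List.pyGetD i 1 0) []))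
              (fun x => x) false)) : Int)) = true then
          (st.1 ++ [(String.ofList (PySem.List.sorted
              ((PySem.Set.ofList (PySem.List.pyGetD (List.map (pvChs orders) (PySem.List.pyRange 0 (orders.length : Int) 1)) (PySem.List.pyGetD i 0 0) [])).inter
                (PySem.List.pyGetD (List.map (pvChs orders) (PySem.List.pyRange 0 (orders.length : Int) 1)) (PySem.List.pyGetD i 1 0) []))
              (fun x => x) false), PySem.List.pyGetD i 0 0)],
           st.2 ++ [PySem.List.pyGetD i 0 0])
        else st) ([], []) =
      ((PySem.List.pyRange 0 (orders.length : Int) 1).flatMap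
         (fun i => (pvJs orders course (orders.length : Int) i).map (fun j => (pvS orders i j, i))),
       (PySem.List.pyRange 0 (orders.length : Int) 1).flatMap
         (fun i => (pvJs orders course (orders.length : Int) i).map (fun _ => i))) := by
    trans (List.foldl (fun (st : List (String × Int) × List Int) p =>
        (if pvOk orders course (PySem.List.pyGetD p 0 0) (PySem.List.pyGetD p 1 0) = true
         then st.1 ++ [(pvS orders (PySem.List.pyGetD p 0 0) (PySem.List.pyGetD p 1 0),
                        PySem.List.pyGetD p 0 0)] else st.1,
         if pvOk orders course (PySem.List.pyGetD p 0 0) (PySem.List.pyGetD p 1 0) = true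
         then st.2 ++ [PySem.List.pyGetD p 0 0] else st.2)) ([], [])
      (List.flatMap (fun i => List.map (fun j => [i, j])
        (PySem.List.pyRange (i + 1) (orders.length : Int) 1))
        (PySem.List.pyRange 0 (orders.length : Int) 1)))
    · apply PySem.List.foldl_congr_mem
      intro st p hp
      rcases List.mem_flatMap.1 hp with ⟨i, hi, hpi⟩
      rcases List.mem_map.1 hpi with ⟨j, hj, rfl⟩
      have hi' := PySem.List.mem_pyRange_one.1 hi
      have hj' := PySem.List.mem_pyRange_one.1 hj
      rw [pyGetD_pair0, pyGetD_pair1,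
          PySem.List.pyGetD_map_pyRange_of_nonneg (pvChs orders) _ i [] hi'.1 hi'.2,
          PySem.List.pyGetD_map_pyRange_of_nonneg (pvChs orders) _ j [] (by omega) hj'.2]
      by_cases hc : pvOk orders course i j = true
      · rw [if_pos (by simpa [pvOk, pvS] using hc), if_pos hc, if_pos hc]
        rfl
      · rw [if_neg (by simpa [pvOk, pvS] using hc), if_neg hc, if_neg hc]
    · rw [PySem.List.foldl_prod_mk
            (fun s1 p => if pvOk orders course (PySem.List.pyGetD p 0 0) (PySem.List.pyGetD p 1 0) = true
              then s1 ++ [(pvS orders (PySem.List.pyGetD p 0 0) (PySem.List.pyGetD p 1 0),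
                           PySem.List.pyGetD p 0 0)] else s1)
            (fun s2 p => if pvOk orders course (PySem.List.pyGetD p 0 0) (PySem.List.pyGetD p 1 0) = true
              then s2 ++ [PySem.List.pyGetD p 0 0] else s2)]
      have hfilt : (List.flatMap (fun i => List.map (fun j => [i, j])
            (PySem.List.pyRange (i + 1) (orders.length : Int) 1))
            (PySem.List.pyRange 0 (orders.length : Int) 1)).filter
            (fun p => pvOk orders course (PySem.List.pyGetD p 0 0) (PySem.List.pyGetD p 1 0)) =
          List.flatMap (fun i => (pvJs orders course (orders.length : Int) i).map (fun j => [i, j]))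
            (PySem.List.pyRange 0 (orders.length : Int) 1) := by
        rw [List.filter_flatMap]
        congr 1
        funext i
        rw [List.filter_map]
        simp only [Function.comp_def, pyGetD_pair0, pyGetD_pair1]
        rfl
      refine Prod.ext ?_ ?_
      · show List.foldl _ [] _ = _
        rw [PySem.List.foldl_append_if
              (fun p => pvOk orders course (PySem.List.pyGetD p 0 0) (PySem.List.pyGetD p 1 0))
              (fun p => (pvS orders (PySem.List.pyGetD p 0 0) (PySem.List.pyGetD p 1 0),
                         PySem.List.pyGetD p 0 0))]
        rw [hfilt, List.map_flatMap, List.nil_append]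
        congr 1
        funext i
        rw [List.map_map]
        simp only [Function.comp_def, pyGetD_pair0, pyGetD_pair1]
      · show List.foldl _ [] _ = _
        rw [PySem.List.foldl_append_if
              (fun p => pvOk orders course (PySem.List.pyGetD p 0 0) (PySem.List.pyGetD p 1 0))
              (fun p => PySem.List.pyGetD p 0 0)]
        rw [hfilt, List.map_flatMap, List.nil_append]
        congr 1
        funext i
        rw [List.map_map]
        simp only [Function.comp_def, pyGetD_pair0]
  simp only [solution, if_neg h]
  rw [hst0]
  dsimp only
  rw [combos2_pyRange 0 (orders.length : Int)]
  rw [hpairs]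
  dsimp only
  have hnd : (PySem.List.pyRange 0 (orders.length : Int) 1).Nodup := PySem.List.nodup_pyRange_one 0 _
  have hC : PySem.Set.ofList
      ((PySem.List.pyRange 0 (orders.length : Int) 1).flatMap
        (fun i => (pvJs orders course (orders.length : Int) i).map (fun _ => i))) =
      (PySem.List.pyRange 0 (orders.length : Int) 1).filter
        (fun i => !(pvJs orders course (orders.length : Int) i).isEmpty) := by
    rw [PySem.Set.ofList_eq_foldl,
        foldl_add_flatMap_const _ _ _ hnd
          (fun i _ x hx => by rcases List.mem_map.1 hx with ⟨j, _, rfl⟩; rfl)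
          (fun i _ => List.not_mem_nil)]
    simp only [List.nil_append]
    apply List.filter_congr
    intro i _
    cases pvJs orders course (orders.length : Int) i <;> simp
  rw [hC, List.foldl_filter]
  congr 2
  apply PySem.List.foldl_congr_mem
  intro ans i hi
  have hemp : (pvGrp orders course (orders.length : Int) i).isEmpty =
      (pvJs orders course (orders.length : Int) i).isEmpty := by
    simp [pvGrp, List.isEmpty_map]
  by_cases he : (pvJs orders course (orders.length : Int) i).isEmpty = true
  · simp [he, hemp]
  · rw [if_pos (by simp [he]), if_neg (by simp [hemp, he])]
    rw [PySem.List.foldl_append_if (fun b : String × Int => b.2 == i)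
          (fun b : String × Int => (PySem.Str.len b.1 : Int))]
    rw [List.filter_flatMap]
    rw [flatMap_pick _ hnd hi _
          (fun i' _ hne => by simp [List.filter_map, hne])]
    simp only [List.filter_map, List.map_map, List.nil_append, Function.comp_def,
      beq_self_eq_true, List.filter_true]
    rw [PySem.List.foldl_append_if
          (fun d : String × Int => PySem.Str.len d.1 ==
            ((PySem.List.max? ((pvJs orders course (orders.length : Int) i).map
              (fun j => (PySem.Str.len (pvS orders i j) : Int))) (fun x => x)).getD 0) && d.2 == i)
          (fun d : String × Int => d.1)]
    rw [List.filter_flatMap]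
    rw [flatMap_pick _ hnd hi _
          (fun i' _ hne => by
            rw [List.filter_map]
            have hb : (i' == i) = false := beq_eq_false_iff_ne.2 hne
            simp only [Function.comp_def, hb, Bool.and_false, List.filter_false,
              List.map_nil])]
    simp only [List.filter_map, List.map_map, Function.comp_def, beq_self_eq_true,
      Bool.and_true, pvSel, pvGrp, pvMax]

-- ===== VERDICT (by name: the statement is the Claim_ definition above) =====
theorem solution_spec : Claim_equal_solution := by
  intro orders course _ _
  unfold Spec_solution
  by_cases h : (PySem.Set.len (PySem.Set.ofList orders) == 1) = true
  · simp only [solution, solution_alt, if_pos h]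
  · rw [a_else orders course h, alt_else orders course h]
    have hfun : (fun (ans : List String) i =>
        if (pvGrp orders course (orders.length : Int) i).isEmpty then ans
        else ans ++ pvSel (pvGrp orders course (orders.length : Int) i)) =
        (fun (ans : List String) i =>
          ans ++ pvSel (pvGrp orders course (orders.length : Int) i)) := by
      funext ans i
      by_cases he : (pvGrp orders course (orders.length : Int) i).isEmpty
      · have hnil : pvGrp orders course (orders.length : Int) i = [] := by simpa using he
        rw [if_pos he, hnil]
        simp [pvSel]
      · rw [if_neg he]
    rw [hfun, PySem.List.foldl_append_eq_flatMap, List.nil_append]
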